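-- pv_equiv track=rewrite | github.com/jameswong2003/CS320-2023-Spring-hwxi | assigns/05/MySolution/Python/assign05_03.py | find_min_seam
-- ===== SOURCE A (Python) =====
-- def find_min_seam(energy):
--     n_rows, n_cols = len(energy), len(energy[0])
--     dp = [[0] * n_cols for _ in range(n_rows)]
--     paths = [[-1] * n_cols for _ in range(n_rows)]
--
--     for j in range(n_cols):
--         dp[0][j] = energy[0][j]
--
--     for i in range(1, n_rows):
--         for j in range(n_cols):
--
--             if j == 0:
--                 dp[i][j] = energy[i][j] + min(dp[i-1][j], dp[i-1][j+1])
--                 if dp[i-1][j] < dp[i-1][j+1]: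
--                     paths[i][j] = j
--                 else:
--                     paths[i][j] = j + 1
--             elif j == n_cols - 1:
--                 dp[i][j] = energy[i][j] + min(dp[i-1][j], dp[i-1][j-1])
--                 if dp[i-1][j] < dp[i-1][j-1]:
--                     paths[i][j] = j
--                 else:
--                     paths[i][j] = j - 1
--             else:
--                 dp[i][j] = energy[i][j] + min(dp[i-1][j-1], dp[i-1][j], dp[i-1][j+1])
--                 if dp[i-1][j-1] <= dp[i-1][j] and dp[i-1][j-1] <= dp[i-1][j+1]:
--                     paths[i][j] = j - 1
--                 elif dp[i-1][j] <= dp[i-1][j-1] and dp[i-1][j] <= dp[i-1][j+1]: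
--                     paths[i][j] = j
--                 else:
--                     paths[i][j] = j + 1
--
--     # Find the minimum energy seam
--     j = dp[n_rows-1].index(min(dp[n_rows-1]))
--     seam = [(n_rows-1, j)]
--     for i in range(n_rows-2, -1, -1):
--         j = paths[i+1][j]
--         seam.append((i, j))
--
--     return seam[::-1]
-- ===== SOURCE B (Python) =====
-- def find_min_seam(energy):
--     n_rows, n_cols = len(energy), len(energy[0])
--     # Forward pass: dp only (no backpointer table); each new row via a window-min list.
--     dp = [energy[0][:n_cols]]
--     for i in range(1, n_rows):
--         p = dp[-1]
--         mins = ([min(p[0], p[1])]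
--                 + [min(p[j - 1], p[j], p[j + 1]) for j in range(1, n_cols - 1)]
--                 + [min(p[n_cols - 1], p[n_cols - 2])])
--         dp.append([energy[i][j] + mins[j] for j in range(n_cols)])
--     # Backtrack from the bottom, recomputing each parent column from dp.
--     j = dp[-1].index(min(dp[-1]))
--     seam = [(n_rows - 1, j)]
--     for i in range(n_rows - 2, -1, -1):
--         p = dp[i]
--         if j == 0:
--             j = j if p[j] < p[j + 1] else j + 1
--         elif j == n_cols - 1:
--             j = j if p[j] < p[j - 1] else j - 1
--         elif p[j - 1] <= p[j] and p[j - 1] <= p[j + 1]: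
--             j = j - 1
--         elif p[j] <= p[j - 1] and p[j] <= p[j + 1]:
--             pass
--         else:
--             j = j + 1
--         seam.append((i, j))
--     return seam[::-1]
-- ===== Notes on version B (the rewrite author's own statement) =====
-- stated objective: alternative
-- what changed: B drops A's paths backpointer table entirely: it builds each dp row from a window-min list over the previous row and backtracks by recomputing each parent column from the dp table with A's exact tie-break rules, instead of storing and looking up backpointers.
import Mathlib
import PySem

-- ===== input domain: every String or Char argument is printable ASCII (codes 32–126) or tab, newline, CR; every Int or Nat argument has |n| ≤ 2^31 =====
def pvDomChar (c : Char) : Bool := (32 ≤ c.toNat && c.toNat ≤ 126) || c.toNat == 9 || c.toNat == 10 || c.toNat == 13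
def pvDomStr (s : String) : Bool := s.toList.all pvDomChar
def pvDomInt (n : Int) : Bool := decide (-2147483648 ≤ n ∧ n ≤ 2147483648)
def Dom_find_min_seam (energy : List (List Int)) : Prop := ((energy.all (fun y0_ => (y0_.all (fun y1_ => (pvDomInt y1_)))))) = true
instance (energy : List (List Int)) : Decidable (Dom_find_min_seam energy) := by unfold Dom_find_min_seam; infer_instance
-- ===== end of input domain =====

-- B replaces A's backpointer table by recomputing each parent column from the dp table during
-- backtracking, and builds each dp row from a window-min list (objective: alternative).


-- shared tiny accessors: xs[i] under Pre_ (all indices in range there)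
def pvRow (m : List (List Int)) (i : Int) : List Int := PySem.List.pyGetD m i []
def pvEl (xs : List Int) (j : Int) : Int := PySem.List.pyGetD xs j 0

-- ===== PORT A =====
-- dp[i][j] assignment of A's inner loop
def pvDpEntry (prev erow : List Int) (nCols j : Int) : Int :=
  if j = 0 then pvEl erow j + min (pvEl prev j) (pvEl prev (j+1))
  else if j = nCols - 1 then pvEl erow j + min (pvEl prev j) (pvEl prev (j-1))
  else pvEl erow j + min (min (pvEl prev (j-1)) (pvEl prev j)) (pvEl prev (j+1))

-- paths[i][j] assignment of A's inner loop
def pvPathEntry (prev : List Int) (nCols j : Int) : Int :=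
  if j = 0 then (if pvEl prev j < pvEl prev (j+1) then j else j + 1)
  else if j = nCols - 1 then (if pvEl prev j < pvEl prev (j-1) then j else j - 1)
  else if pvEl prev (j-1) ≤ pvEl prev j ∧ pvEl prev (j-1) ≤ pvEl prev (j+1) then j - 1
  else if pvEl prev j ≤ pvEl prev (j-1) ∧ pvEl prev j ≤ pvEl prev (j+1) then j
  else j + 1

-- one iteration of A's outer loop: fill dp[i] and paths[i]
def pvAstep (energy : List (List Int)) (nCols : Int)
    (st : List (List Int) × List (List Int)) (i : Int) :
    List (List Int) × List (List Int) :=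
  let prev := pvRow st.1 (i - 1)
  let erow := pvRow energy i
  let rows := (PySem.List.pyRange 0 nCols 1).foldl
    (fun (r : List Int × List Int) j =>
      (r.1 ++ [pvDpEntry prev erow nCols j], r.2 ++ [pvPathEntry prev nCols j])) ([], [])
  (st.1 ++ [rows.1], st.2 ++ [rows.2])

def find_min_seam (energy : List (List Int)) : List (Int × Int) :=
  let nRows : Int := (energy.length : Int)
  let nCols : Int := ((pvRow energy 0).length : Int)
  let dp0 := (PySem.List.pyRange 0 nCols 1).foldl
    (fun (r : List Int) j => r ++ [pvEl (pvRow energy 0) j]) []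
  let st := (PySem.List.pyRange 1 nRows 1).foldl (pvAstep energy nCols)
    ([dp0], [PySem.List.pyRepeat [(-1 : Int)] nCols])
  let lastRow := pvRow st.1 (nRows - 1)
  let j0 : Int :=
    (((PySem.List.index? lastRow ((PySem.List.min? lastRow (fun x => x)).getD 0)).getD 0 : Nat) : Int)
  let bt := (PySem.List.pyRange (nRows - 2) (-1) (-1)).foldl
    (fun (acc : List (Int × Int) × Int) i =>
      let j := pvEl (pvRow st.2 (i + 1)) acc.2
      (acc.1 ++ [(i, j)], j)) ([(nRows - 1, j0)], j0)
  bt.1.reverse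

-- ===== PORT B =====
-- B's backtrack step: recompute the parent column of j (row i+1) from dp row i
def pvParent (p : List Int) (nCols j : Int) : Int :=
  if j = 0 then (if pvEl p j < pvEl p (j+1) then j else j + 1)
  else if j = nCols - 1 then (if pvEl p j < pvEl p (j-1) then j else j - 1)
  else if pvEl p (j-1) ≤ pvEl p j ∧ pvEl p (j-1) ≤ pvEl p (j+1) then j - 1
  else if pvEl p j ≤ pvEl p (j-1) ∧ pvEl p j ≤ pvEl p (j+1) then j
  else j + 1

-- B's window-min list over the previous dp row
def pvMins (p : List Int) (nCols : Int) : List Int :=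
  [min (pvEl p 0) (pvEl p 1)]
    ++ (PySem.List.pyRange 1 (nCols - 1) 1).map
        (fun j => min (min (pvEl p (j-1)) (pvEl p j)) (pvEl p (j+1)))
    ++ [min (pvEl p (nCols - 1)) (pvEl p (nCols - 2))]

-- B's new dp row
def pvBrow (p erow : List Int) (nCols : Int) : List Int :=
  (PySem.List.pyRange 0 nCols 1).map (fun j => pvEl erow j + pvEl (pvMins p nCols) j)

def find_min_seam_alt (energy : List (List Int)) : List (Int × Int) :=
  let nRows : Int := (energy.length : Int)
  let nCols : Int := ((pvRow energy 0).length : Int)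
  let dp := (PySem.List.pyRange 1 nRows 1).foldl
    (fun (dp : List (List Int)) i =>
      dp ++ [pvBrow (PySem.List.pyGetD dp (-1) []) (pvRow energy i) nCols])
    [PySem.List.slice (pvRow energy 0) none (some nCols)]
  let lastRow := PySem.List.pyGetD dp (-1) []
  let j0 : Int :=
    (((PySem.List.index? lastRow ((PySem.List.min? lastRow (fun x => x)).getD 0)).getD 0 : Nat) : Int)
  let bt := (PySem.List.pyRange (nRows - 2) (-1) (-1)).foldl
    (fun (acc : List (Int × Int) × Int) i =>
      let j := pvParent (pvRow dp i) nCols acc.2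
      (acc.1 ++ [(i, j)], j)) ([(nRows - 1, j0)], j0)
  bt.1.reverse

-- ===== PRECONDITION & SPEC =====
-- Pre_ excludes exactly the inputs where A raises (IndexError): empty grid, a row shorter than
-- row 0, and a single-column grid with at least two rows (A reads dp[i-1][j+1] there).
def Pre_find_min_seam (energy : List (List Int)) : Prop :=
  energy ≠ [] ∧ 1 ≤ (energy.headD []).length ∧
    (∀ r ∈ energy, (energy.headD []).length ≤ r.length) ∧
    (energy.length = 1 ∨ 2 ≤ (energy.headD []).length)
instance (energy : List (List Int)) : Decidable (Pre_find_min_seam energy) := by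
  unfold Pre_find_min_seam; infer_instance

def pvWitness_find_min_seam : List (List Int) := [[1, 2], [3, 4], [5, 0]]

def Spec_find_min_seam (energy : List (List Int)) (out : List (Int × Int)) : Prop := out = find_min_seam_alt energy
instance (energy : List (List Int)) (out : List (Int × Int)) : Decidable (Spec_find_min_seam energy out) := by unfold Spec_find_min_seam; infer_instance

-- ===== CLAIM (what is proved, stated in full; the proofs are below) =====
def Claim_equal_find_min_seam : Prop := ∀ (energy : List (List Int)), Dom_find_min_seam energy → Pre_find_min_seam energy → Spec_find_min_seam energy (find_min_seam energy)

-- ===== LEMMAS AND PROOFS =====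

lemma pv_parent_range (p : List Int) (c j : Int) (hc : 2 ≤ c) (h0 : 0 ≤ j) (h1 : j < c) :
    0 ≤ pvParent p c j ∧ pvParent p c j < c := by
  unfold pvParent; split_ifs <;> omega

lemma pv_pathentry_eq (p : List Int) (c j : Int) : pvPathEntry p c j = pvParent p c j := rfl

lemma pv_astep_eq (energy : List (List Int)) (c : Int) (st : List (List Int) × List (List Int)) (i : Int) :
    pvAstep energy c st i =
      (st.1 ++ [(PySem.List.pyRange 0 c 1).map (pvDpEntry (pvRow st.1 (i-1)) (pvRow energy i) c)],
       st.2 ++ [(PySem.List.pyRange 0 c 1).map (pvPathEntry (pvRow st.1 (i-1)) c)]) := by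
  simp only [pvAstep]
  rw [PySem.List.foldl_prod_mk (f := fun r1 j => r1 ++ [pvDpEntry (pvRow st.1 (i-1)) (pvRow energy i) c j])
      (g := fun r2 j => r2 ++ [pvPathEntry (pvRow st.1 (i-1)) c j])]
  rw [PySem.List.foldl_append_singleton_eq_map, PySem.List.foldl_append_singleton_eq_map]
  simp

lemma pv_mins_eq (p : List Int) (c j : Int) (hc : 2 ≤ c) (h0 : 0 ≤ j) (h1 : j < c) :
    pvEl (pvMins p c) j =
      if j = 0 then min (pvEl p j) (pvEl p (j+1))
      else if j = c - 1 then min (pvEl p j) (pvEl p (j-1))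
      else min (min (pvEl p (j-1)) (pvEl p j)) (pvEl p (j+1)) := by
  have hlen : (PySem.List.pyRange 1 (c-1) 1).length = (c-2).toNat := by
    rw [PySem.List.length_pyRange_one]; omega
  have hM : pvMins p c = (min (pvEl p 0) (pvEl p 1) :: (PySem.List.pyRange 1 (c-1) 1).map
      (fun j => min (min (pvEl p (j-1)) (pvEl p j)) (pvEl p (j+1))))
      ++ [min (pvEl p (c - 1)) (pvEl p (c - 2))] := by simp [pvMins]
  rw [pvEl, hM, PySem.List.pyGetD_eq_getElem _ _ h0 (by simp only [List.length_append, List.length_cons, List.length_map, hlen]; omega)]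
  by_cases hj0 : j = 0
  · subst hj0
    rw [List.getElem_append_left (by simp only [List.length_cons, List.length_map, hlen]; omega)]
    simp
  · by_cases hjl : j = c - 1
    · subst hjl
      rw [List.getElem_append_right (by simp only [List.length_cons, List.length_map, hlen]; omega)]
      simp [hlen, hj0, show c - 1 - 1 = c - 2 from by ring]
    · have hj1 : 1 ≤ j := by omega
      rw [List.getElem_append_left (by simp only [List.length_cons, List.length_map, hlen]; omega)]
      rw [List.getElem_cons]
      rw [dif_neg (by omega : ¬ j.toNat = 0)]
      rw [List.getElem_map, PySem.List.getElem_pyRange_one]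
      have hh : (1 : Int) + ((j.toNat - 1 : Nat) : Int) = j := by omega
      rw [hh]
      simp [hj0, hjl]

lemma pv_brow_eq (p erow : List Int) (c : Int) (hc : 2 ≤ c) :
    pvBrow p erow c = (PySem.List.pyRange 0 c 1).map (fun j => pvDpEntry p erow c j) := by
  unfold pvBrow
  apply List.map_congr_left
  intro j hj
  obtain ⟨h0, h1⟩ := (PySem.List.mem_pyRange_one).1 hj
  rw [pv_mins_eq p c j hc h0 h1, pvDpEntry]
  split_ifs <;> rfl

lemma pv_row_append_lt (xs : List (List Int)) (y : List Int) (i : Int)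
    (h0 : 0 ≤ i) (h1 : i < (xs.length : Int)) : pvRow (xs ++ [y]) i = pvRow xs i := by
  rw [pvRow, pvRow, PySem.List.pyGetD_eq_getElem _ _ h0 (by simp; omega),
    PySem.List.pyGetD_eq_getElem _ _ h0 (by exact_mod_cast h1)]
  exact List.getElem_append_left (by omega)

lemma pv_row_append_eq (xs : List (List Int)) (y : List Int) (i : Int)
    (h : i = (xs.length : Int)) : pvRow (xs ++ [y]) i = y := by
  subst h
  rw [pvRow, PySem.List.pyGetD_eq_getElem _ _ (by omega) (by simp)]
  rw [List.getElem_append_right (by simp)]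
  simp

lemma pv_row_last (xs : List (List Int)) (h : xs ≠ []) (i : Int)
    (hi : i = (xs.length : Int) - 1) : pvRow xs i = PySem.List.pyGetD xs (-1) [] := by
  have hl : 1 ≤ xs.length := List.length_pos_of_ne_nil h
  subst hi
  rw [PySem.List.pyGetD_neg_one _ _ h, List.getLast_eq_getElem, pvRow,
    PySem.List.pyGetD_eq_getElem _ _ (by omega) (by omega)]
  congr 1
  omega

def pvFoldA (energy : List (List Int)) (c : Int) (init : List (List Int) × List (List Int)) (m : Int) :
    List (List Int) × List (List Int) :=
  (PySem.List.pyRange 1 m 1).foldl (pvAstep energy c) init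

def pvFoldB (energy : List (List Int)) (c : Int) (init : List (List Int)) (m : Int) : List (List Int) :=
  (PySem.List.pyRange 1 m 1).foldl
    (fun (dp : List (List Int)) i =>
      dp ++ [pvBrow (PySem.List.pyGetD dp (-1) []) (pvRow energy i) c]) init

lemma pv_forward (energy : List (List Int)) (c : Int) (hc : 2 ≤ c)
    (r0 pr0 : List Int) (hr0 : r0.length = c.toNat) (k : Nat) :
    (pvFoldA energy c ([r0], [pr0]) (1 + k)).1 = pvFoldB energy c [r0] (1 + k) ∧
    (pvFoldB energy c [r0] (1 + k)).length = k + 1 ∧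
    (∀ r ∈ pvFoldB energy c [r0] (1 + k), r.length = c.toNat) ∧
    (pvFoldA energy c ([r0], [pr0]) (1 + k)).2.length = k + 1 ∧
    (∀ i : Int, 1 ≤ i → i ≤ k → ∀ j : Int, 0 ≤ j → j < c →
      pvEl (pvRow (pvFoldA energy c ([r0], [pr0]) (1 + k)).2 i) j
        = pvParent (pvRow (pvFoldB energy c [r0] (1 + k)) (i - 1)) c j) := by
  induction k with
  | zero =>
    unfold pvFoldA pvFoldB
    have h01 : (1 + ((0:Nat):Int)) = 1 := by omega
    rw [h01, PySem.List.pyRange_one_eq_nil le_rfl]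
    simp only [List.foldl_nil]
    refine ⟨?_, ?_, ?_, ?_, ?_⟩
    · trivial
    · simp
    · intro r hr; simp at hr; subst hr; exact hr0
    · simp
    · intro i hi1 hik j hj0 hjc; omega

  | succ k ih =>
    obtain ⟨ha, hlb, hrows, hla, he⟩ := ih
    have hsplit : PySem.List.pyRange 1 (1 + ((k+1 : Nat) : Int)) 1
        = PySem.List.pyRange 1 (1 + (k : Int)) 1 ++ [1 + (k : Int)] := by
      rw [show (1 + ((k+1 : Nat) : Int)) = (1 + (k : Int)) + 1 from by omega]
      exact PySem.List.pyRange_one_succ_right (by omega)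
    have hfa : pvFoldA energy c ([r0], [pr0]) (1 + ((k+1 : Nat) : Int))
        = pvAstep energy c (pvFoldA energy c ([r0], [pr0]) (1 + (k : Int))) (1 + (k : Int)) := by
      simp only [pvFoldA, hsplit, List.foldl_append, List.foldl_cons, List.foldl_nil]
    have hfb : pvFoldB energy c [r0] (1 + ((k+1 : Nat) : Int))
        = pvFoldB energy c [r0] (1 + (k : Int)) ++
          [pvBrow (PySem.List.pyGetD (pvFoldB energy c [r0] (1 + (k : Int))) (-1) [])
            (pvRow energy (1 + (k : Int))) c] := by
      simp only [pvFoldB, hsplit, List.foldl_append, List.foldl_cons, List.foldl_nil]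
    set stA := pvFoldA energy c ([r0], [pr0]) (1 + (k : Int)) with hstA
    set dpB := pvFoldB energy c [r0] (1 + (k : Int)) with hdpB
    have hBne : dpB ≠ [] := by intro h; rw [h] at hlb; simp at hlb
    have hlA1 : stA.1.length = k + 1 := by rw [ha]; exact hlb
    have hprev : pvRow stA.1 (1 + (k : Int) - 1) = PySem.List.pyGetD dpB (-1) [] := by
      rw [pv_row_last stA.1 (by intro h; rw [h] at hlA1; simp at hlA1) _
        (by rw [hlA1]; omega), ha]
    have hnew : (PySem.List.pyRange 0 c 1).map
        (pvDpEntry (pvRow stA.1 (1 + (k : Int) - 1)) (pvRow energy (1 + (k : Int))) c)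
        = pvBrow (PySem.List.pyGetD dpB (-1) []) (pvRow energy (1 + (k : Int))) c := by
      rw [pv_brow_eq _ _ _ hc, hprev]
    have hstep := pv_astep_eq energy c stA (1 + (k : Int))
    refine ⟨?_, ?_, ?_, ?_, ?_⟩
    · rw [hfa, hfb, hstep]
      simp only []
      rw [hnew, ha]
    · rw [hfb]; simp [hlb]
    · rw [hfb]
      intro r hr
      rcases List.mem_append.1 hr with h | h
      · exact hrows r h
      · simp at h; subst h
        rw [pvBrow]
        simp [PySem.List.length_pyRange_one]
    · rw [hfa, hstep]; simp [hla]
    · intro i hi1 hik j hj0 hjc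
      rw [hfa, hfb, hstep]
      simp only []
      by_cases hik' : i ≤ (k : Int)
      · rw [pv_row_append_lt stA.2 _ i (by omega) (by rw [hla]; omega)]
        rw [pv_row_append_lt dpB _ (i-1) (by omega) (by rw [hlb]; omega)]
        exact he i hi1 hik' j hj0 hjc
      · have hi : i = 1 + (k : Int) := by omega
        subst hi
        rw [pv_row_append_eq stA.2 _ _ (by rw [hla]; omega)]
        rw [pv_row_append_lt dpB _ (1 + (k : Int) - 1) (by omega) (by rw [hlb]; omega)]
        rw [show pvEl ((PySem.List.pyRange 0 c 1).map
            (pvPathEntry (pvRow stA.1 (1 + (k : Int) - 1)) c)) j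
          = pvPathEntry (pvRow stA.1 (1 + (k : Int) - 1)) c j from
          PySem.List.pyGetD_map_pyRange_of_nonneg _ _ _ _ hj0 hjc]
        rw [pv_pathentry_eq, hprev]
        rw [pv_row_last dpB hBne _ (by rw [hlb]; omega)]

lemma pv_backtrack (paths dpB : List (List Int)) (c : Int) (hc : 2 ≤ c) (l : List Int)
    (H : ∀ i ∈ l, ∀ j : Int, 0 ≤ j → j < c →
      pvEl (pvRow paths (i+1)) j = pvParent (pvRow dpB i) c j) :
    ∀ (acc : List (Int × Int)) (j : Int), 0 ≤ j → j < c →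
      l.foldl (fun (a : List (Int × Int) × Int) i =>
          (a.1 ++ [(i, pvEl (pvRow paths (i+1)) a.2)], pvEl (pvRow paths (i+1)) a.2)) (acc, j)
      = l.foldl (fun (a : List (Int × Int) × Int) i =>
          (a.1 ++ [(i, pvParent (pvRow dpB i) c a.2)], pvParent (pvRow dpB i) c a.2)) (acc, j) := by
  induction l with
  | nil => intro acc j _ _; rfl
  | cons i t ih =>
    intro acc j hj0 hjc
    simp only [List.foldl_cons]
    rw [H i (by simp) j hj0 hjc]
    obtain ⟨h0', h1'⟩ := pv_parent_range (pvRow dpB i) c j hc hj0 hjc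
    exact ih (fun i' hi' j' a b => H i' (by simp [hi']) j' a b) _ _ h0' h1'

theorem pv_main (energy : List (List Int)) (hpre : Pre_find_min_seam energy) :
    find_min_seam energy = find_min_seam_alt energy := by
  obtain ⟨hne, hc1, hrows0, hcase⟩ := hpre
  have hhead : energy.headD [] = pvRow energy 0 := by
    cases energy with
    | nil => exact absurd rfl hne
    | cons h t => simp [pvRow, PySem.List.pyGetD_zero_cons]
  rw [hhead] at hc1 hrows0 hcase
  have hlp : 1 ≤ energy.length := List.length_pos_of_ne_nil hne
  have hdp0 : (PySem.List.pyRange 0 ((pvRow energy 0).length : Int) 1).foldl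
      (fun (r : List Int) j => r ++ [pvEl (pvRow energy 0) j]) [] = pvRow energy 0 := by
    rw [PySem.List.foldl_append_singleton_eq_map, List.nil_append]
    simpa [pvEl] using PySem.List.map_pyGetD_pyRange_zero (pvRow energy 0) 0
  have hsl : PySem.List.slice (pvRow energy 0) none (some ((pvRow energy 0).length : Int))
      = pvRow energy 0 := by
    rw [PySem.List.slice_to _ (by exact_mod_cast Int.natCast_nonneg _)]
    simp
  simp only [find_min_seam, find_min_seam_alt]
  rw [hdp0, hsl]
  have ea : ∀ (init : List (List Int) × List (List Int)) (m : Int),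
      (PySem.List.pyRange 1 m 1).foldl (pvAstep energy ((pvRow energy 0).length : Int)) init
        = pvFoldA energy ((pvRow energy 0).length : Int) init m := fun _ _ => rfl
  have eb : ∀ (init : List (List Int)) (m : Int),
      (PySem.List.pyRange 1 m 1).foldl
        (fun (dp : List (List Int)) i =>
          dp ++ [pvBrow (PySem.List.pyGetD dp (-1) []) (pvRow energy i)
            ((pvRow energy 0).length : Int)]) init
        = pvFoldB energy ((pvRow energy 0).length : Int) init m := fun _ _ => rfl
  rw [ea, eb]
  by_cases hone : energy.length = 1
  · -- single-row grid: the outer loops run zero times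
    rw [show ((energy.length : Int)) = 1 from by omega]
    rw [show (pvFoldA energy ((pvRow energy 0).length : Int)
        ([pvRow energy 0], [PySem.List.pyRepeat [-1] ((pvRow energy 0).length : Int)]) 1)
      = ([pvRow energy 0], [PySem.List.pyRepeat [-1] ((pvRow energy 0).length : Int)]) from by
        rw [pvFoldA, PySem.List.pyRange_one_eq_nil le_rfl]; rfl]
    rw [show (pvFoldB energy ((pvRow energy 0).length : Int) [pvRow energy 0] 1)
      = [pvRow energy 0] from by
        rw [pvFoldB, PySem.List.pyRange_one_eq_nil le_rfl]; rfl]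
    rw [show pvRow [pvRow energy 0] ((1:Int) - 1) = pvRow energy 0 from by
      rw [show ((1:Int) - 1) = 0 from by norm_num, pvRow, PySem.List.pyGetD_zero_cons]]
    rw [show PySem.List.pyGetD [pvRow energy 0] (-1) ([] : List Int) = pvRow energy 0 from by
      rw [PySem.List.pyGetD_neg_one _ _ (by simp), List.getLast_singleton]]
    rw [show PySem.List.pyRange ((1:Int) - 2) (-1) (-1) = [] from
      PySem.List.pyRange_neg_one_eq_nil (by norm_num)]
    simp only [List.foldl_nil]
  · have hc : 2 ≤ ((pvRow energy 0).length : Int) := by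
      rcases hcase with h | h
      · exact absurd h hone
      · exact_mod_cast h
    obtain ⟨ha, hlb, hrows, hla, he⟩ := pv_forward energy ((pvRow energy 0).length : Int) hc
      (pvRow energy 0) (PySem.List.pyRepeat [-1] ((pvRow energy 0).length : Int))
      (by simp) (energy.length - 1)
    rw [show ((energy.length : Int)) = 1 + ((energy.length - 1 : Nat) : Int) from by omega]
    set c : Int := ((pvRow energy 0).length : Int) with hcdef
    set stA := pvFoldA energy c
      ([pvRow energy 0], [PySem.List.pyRepeat [-1] c]) (1 + ((energy.length - 1 : Nat) : Int))
      with hstA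
    set dpB := pvFoldB energy c [pvRow energy 0] (1 + ((energy.length - 1 : Nat) : Int)) with hdpB
    have hBne : dpB ≠ [] := by intro h; rw [h] at hlb; simp at hlb
    have hlast : pvRow stA.1 (1 + ((energy.length - 1 : Nat) : Int) - 1)
        = PySem.List.pyGetD dpB (-1) [] := by
      rw [ha]; exact pv_row_last dpB hBne _ (by rw [hlb]; omega)
    rw [hlast]
    set lastRow := PySem.List.pyGetD dpB (-1) [] with hlr
    have hmemL : lastRow ∈ dpB := by
      rw [hlr, PySem.List.pyGetD_neg_one _ _ hBne]; exact List.getLast_mem hBne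
    have hllen : lastRow.length = c.toNat := hrows lastRow hmemL
    have hlne : lastRow ≠ [] := by
      intro h; rw [h] at hllen; simp at hllen; omega
    obtain ⟨m, hm⟩ : ∃ m, PySem.List.min? lastRow (fun x => x) = some m := by
      cases hmin : PySem.List.min? lastRow (fun x => x) with
      | none => exact absurd ((PySem.List.min?_eq_none_iff _ _).1 hmin) hlne
      | some m => exact ⟨m, rfl⟩
    have hmmem := PySem.List.min?_mem hm
    have hsome : (PySem.List.index? lastRow
        ((PySem.List.min? lastRow (fun x => x)).getD 0)).isSome := by
      rw [hm, Option.getD_some, PySem.List.index?_isSome_iff]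
      exact hmmem
    obtain ⟨k0, hk0⟩ := Option.isSome_iff_exists.1 hsome
    obtain ⟨hklt, -, -⟩ := PySem.List.getElem_of_index?_eq_some hk0
    rw [hk0, Option.getD_some]
    have hj00 : (0:Int) ≤ (k0 : Int) := by omega
    have hj0c : (k0 : Int) < c := by rw [hllen] at hklt; omega
    have H : ∀ i ∈ PySem.List.pyRange (1 + ((energy.length - 1 : Nat) : Int) - 2) (-1) (-1),
        ∀ j : Int, 0 ≤ j → j < c →
        pvEl (pvRow stA.2 (i+1)) j = pvParent (pvRow dpB i) c j := by
      intro i hi j hj0 hjc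
      rw [PySem.List.pyRange_neg_one] at hi
      simp only [List.mem_map, List.mem_range] at hi
      obtain ⟨kk, hkk, rfl⟩ := hi
      have hi1 : 1 ≤ 1 + ((energy.length - 1 : Nat) : Int) - 2 - (kk : Int) + 1 := by omega
      have hi2 : 1 + ((energy.length - 1 : Nat) : Int) - 2 - (kk : Int) + 1
          ≤ ((energy.length - 1 : Nat) : Int) := by omega
      have := he _ hi1 hi2 j hj0 hjc
      rwa [show (1 + ((energy.length - 1 : Nat) : Int) - 2 - (kk : Int) + 1) - 1
        = 1 + ((energy.length - 1 : Nat) : Int) - 2 - (kk : Int) from by ring] at this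
    rw [pv_backtrack stA.2 dpB c hc _ H _ _ hj00 hj0c]

-- ===== VERDICT (by name: the statement is the Claim_ definition above) =====
theorem find_min_seam_spec : Claim_equal_find_min_seam := by
  intro energy _ hpre
  unfold Spec_find_min_seam
  exact pv_main energy hpre
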